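-- pv_equiv track=rewrite | github.com/crankfoot/crankfoot | crankfoot.py | mash_left
-- ===== SOURCE A (Python) =====
-- def mash_left(word1, word2):
--     '''Pushes word1 into word2 from the left'''
--
--     if not word1:
--         return word2
--     if not word2:
--         return word1
--
--     for i in range(len(word1)):
--         lastchars = word1[len(word1) - (i+1):]
--         if i < len(word2):
--             firstchars = word2[:i+1]
--             if lastchars == firstchars:
--                 return word1 + word2[len(lastchars):]
--     return word1+word2
-- ===== SOURCE B (Python) =====
-- def mash_left(word1, word2):
--     '''Pushes word1 into word2 from the left'''
--     if not word1:
--         return word2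
--     if not word2:
--         return word1
--     # KMP prefix function of word2 + sentinel + word1: its positive borders are
--     # exactly the overlaps (suffix of word1 == prefix of word2); the smallest
--     # positive border, found by following the failure chain, is the overlap used.
--     t = word2 + "\x00" + word1
--     pi = [0]
--     for i in range(1, len(t)):
--         k = pi[i - 1]
--         while k > 0 and t[i] != t[k]:
--             k = pi[k - 1]
--         pi.append(k + 1 if t[i] == t[k] else k)
--     k = pi[-1]
--     while k > 0 and pi[k - 1] > 0:
--         k = pi[k - 1]
--     return word1 + word2[k:] if k > 0 else word1 + word2
-- ===== Notes on version B (the rewrite author's own statement) =====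
-- stated objective: faster
-- what changed: B replaces A's try-every-overlap slice-and-compare scan by the KMP prefix function of word2 + '\x00' + word1: the smallest positive border of that combined string, found by following the failure-link chain from the last prefix-function value, is exactly the smallest suffix/prefix overlap A searches for.
import Mathlib
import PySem

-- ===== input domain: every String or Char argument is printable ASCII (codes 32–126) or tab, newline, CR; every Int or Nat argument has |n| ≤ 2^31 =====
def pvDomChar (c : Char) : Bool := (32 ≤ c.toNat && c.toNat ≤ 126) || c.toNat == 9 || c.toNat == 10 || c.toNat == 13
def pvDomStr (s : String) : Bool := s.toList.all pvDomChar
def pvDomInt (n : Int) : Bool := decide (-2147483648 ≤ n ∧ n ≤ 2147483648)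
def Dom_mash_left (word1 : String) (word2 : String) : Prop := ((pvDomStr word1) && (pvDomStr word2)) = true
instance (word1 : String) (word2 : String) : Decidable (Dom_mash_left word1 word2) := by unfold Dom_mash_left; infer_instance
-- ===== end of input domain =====

-- B replaces A's quadratic try-every-overlap scan by the KMP prefix function of
-- word2 + '\x00' + word1: the smallest positive border of that string (found by
-- following the failure chain) is exactly the smallest overlap A searches for; linear time.

-- ===== PORT A =====
-- the for-loop with early return: recursion over the remaining range list
def mashA_loop (l1 l2 : List Char) : List Int → String
  | [] => String.ofList (l1 ++ l2)
  | i :: rest =>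
      let lastchars := PySem.List.slice l1 (some ((l1.length : Int) - (i + 1))) none
      if i < (l2.length : Int) then
        let firstchars := PySem.List.slice l2 none (some (i + 1))
        if lastchars = firstchars then
          String.ofList (l1 ++ PySem.List.slice l2 (some ((lastchars.length : Int))) none)
        else mashA_loop l1 l2 rest
      else mashA_loop l1 l2 rest

def mash_left (word1 : String) (word2 : String) : String :=
  if word1.toList = [] then word2
  else if word2.toList = [] then word1
  else mashA_loop word1.toList word2.toList (PySem.List.pyRange 0 (word1.toList.length : Int) 1)

-- ===== PORT B =====
-- the inner `while k > 0 and t[i] != t[k]: k = pi[k-1]` loop; the fuel argument only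
-- makes the recursion structural (k strictly decreases, so fuel = k is always enough)
def kmpFall (t : List Char) (pi : List Nat) (c : Char) : Nat → Nat → Nat
  | 0, k => k
  | fuel + 1, k =>
      if 0 < k ∧ ¬ (t.getD k ' ' = c) then kmpFall t pi c fuel (pi.getD (k - 1) 0) else k

-- one iteration of the `for i in range(1, len(t))` loop body (indices are always in range)
def kmpStep (t : List Char) (pi : List Nat) (i : Nat) : List Nat :=
  let k0 := pi.getD (i - 1) 0
  let k := kmpFall t pi (t.getD i ' ') k0 k0
  pi ++ [if t.getD i ' ' = t.getD k ' ' then k + 1 else k]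

def kmpBuild (t : List Char) : List Nat :=
  (List.range' 1 (t.length - 1)).foldl (kmpStep t) [0]

-- the final `while k > 0 and pi[k-1] > 0: k = pi[k-1]` loop (fuel as above)
def chainMin (pi : List Nat) : Nat → Nat → Nat
  | 0, k => k
  | fuel + 1, k =>
      if 0 < k ∧ 0 < pi.getD (k - 1) 0 then chainMin pi fuel (pi.getD (k - 1) 0) else k

def mash_left_alt (word1 : String) (word2 : String) : String :=
  if word1.toList = [] then word2
  else if word2.toList = [] then word1
  else
    let l1 := word1.toList
    let l2 := word2.toList
    let t := l2 ++ '\x00' :: l1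
    let pis := kmpBuild t
    let kl := pis.getD (t.length - 1) 0   -- pi[-1] (pi has length len(t))
    let k := chainMin pis kl kl
    if 0 < k then String.ofList (l1 ++ PySem.List.slice l2 (some (k : Int)) none)
    else String.ofList (l1 ++ l2)

-- ===== PRECONDITION & SPEC =====
def Spec_mash_left (word1 : String) (word2 : String) (out : String) : Prop := out = mash_left_alt word1 word2
instance (word1 : String) (word2 : String) (out : String) : Decidable (Spec_mash_left word1 word2 out) := by unfold Spec_mash_left; infer_instance

-- ===== CLAIM (what is proved, stated in full; the proofs are below) =====
def Claim_equal_mash_left : Prop := ∀ (word1 : String) (word2 : String), Dom_mash_left word1 word2 → Spec_mash_left word1 word2 (mash_left word1 word2)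

-- ===== LEMMAS AND PROOFS =====

-- the match predicate at overlap length k
def ovMatch (l1 l2 : List Char) (k : Nat) : Bool :=
  decide (l1.drop (l1.length - k) = l2.take k)

-- k is a (proper) border of s: prefix of length k = suffix of length k
def brd (s : List Char) (k : Nat) : Prop :=
  k < s.length ∧ s.take k = s.drop (s.length - k)

-- longest proper border
def mxb (s : List Char) : Nat :=
  Nat.findGreatest (fun k => s.take k = s.drop (s.length - k)) (s.length - 1)

theorem brd_zero (s : List Char) (h : s ≠ []) : brd s 0 := by
  constructor
  · exact List.length_pos_iff.mpr h
  · rw [List.take_zero, Nat.sub_zero, List.drop_length]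

theorem mxb_lt_length (s : List Char) (h : s ≠ []) : mxb s < s.length := by
  have h1 : 0 < s.length := List.length_pos_iff.mpr h
  have := Nat.findGreatest_le (P := fun k => s.take k = s.drop (s.length - k)) (s.length - 1)
  unfold mxb; omega

theorem mxb_brd (s : List Char) (h : s ≠ []) : brd s (mxb s) := by
  refine ⟨mxb_lt_length s h, ?_⟩
  refine Nat.findGreatest_spec (P := fun k => s.take k = s.drop (s.length - k)) (m := 0) (Nat.zero_le _) ?_
  show s.take 0 = s.drop (s.length - 0)
  rw [List.take_zero, Nat.sub_zero, List.drop_length]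

theorem brd_le_mxb (s : List Char) (k : Nat) (h : brd s k) : k ≤ mxb s := by
  have h1 := h.1
  exact Nat.le_findGreatest (by omega) h.2

-- borders of borders: a smaller border lives inside a larger one
theorem brd_nested (s : List Char) (j k : Nat) (hk : brd s k) (hj : brd s j) (hjk : j < k) :
    brd (s.take k) j := by
  have hkl := hk.1
  refine ⟨by rw [List.length_take]; omega, ?_⟩
  have hL : (s.take k).length = k := by rw [List.length_take]; omega
  rw [hL]
  calc (s.take k).take j = s.take j := by rw [List.take_take]; congr 1; omega
    _ = s.drop (s.length - j) := hj.2
    _ = (s.drop (s.length - k)).drop (k - j) := by rw [List.drop_drop]; congr 1; omega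
    _ = (s.take k).drop (k - j) := by rw [hk.2]

-- a border of a border is a border
theorem brd_trans (s : List Char) (j k : Nat) (hk : brd s k) (hj : brd (s.take k) j) :
    brd s j := by
  have hkl := hk.1
  have hL : (s.take k).length = k := by rw [List.length_take]; omega
  have hjk : j < k := by have := hj.1; rwa [hL] at this
  refine ⟨by omega, ?_⟩
  have h2 := hj.2
  rw [hL] at h2
  calc s.take j = (s.take k).take j := by rw [List.take_take]; congr 1; omega
    _ = (s.take k).drop (k - j) := h2
    _ = (s.drop (s.length - k)).drop (k - j) := by rw [hk.2]
    _ = s.drop (s.length - j) := by rw [List.drop_drop]; congr 1; omega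

-- extension: borders of s ++ [c]
theorem brd_snoc (u : List Char) (c : Char) (k : Nat) :
    brd (u ++ [c]) (k + 1) ↔ brd u k ∧ u.getD k ' ' = c := by
  by_cases hk : k < u.length
  · have hlen : (u ++ [c]).length = u.length + 1 := by simp
    have ht : (u ++ [c]).take (k + 1) = u.take k ++ [u.getD k ' '] := by
      rw [List.take_append_of_le_length (by omega), List.take_succ,
        List.getElem?_eq_getElem hk, List.getD_eq_getElem u ' ' hk]
      rfl
    have hd : (u ++ [c]).drop (u.length + 1 - (k + 1)) = u.drop (u.length - k) ++ [c] := by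
      rw [show u.length + 1 - (k + 1) = u.length - k by omega,
        List.drop_append_of_le_length (by omega)]
    have hql : (u.drop (u.length - k)).length = k := by rw [List.length_drop]; omega
    constructor
    · rintro ⟨h1, h2⟩
      rw [hlen] at h2
      rw [ht, hd] at h2
      have := List.append_inj h2 (by rw [List.length_take, hql]; omega)
      refine ⟨⟨hk, ?_⟩, ?_⟩
      · exact this.1
      · simpa using this.2
    · rintro ⟨⟨_, h2⟩, h3⟩
      refine ⟨by rw [hlen]; omega, ?_⟩
      rw [hlen, ht, hd, h2, h3]
  · constructor
    · rintro ⟨h1, _⟩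
      have : k + 1 < u.length + 1 := by simpa using h1
      omega
    · rintro ⟨⟨h1, _⟩, _⟩
      exact absurd h1 hk

-- the falling loop computes the longest extendable border
theorem kmpFall_spec (t : List Char) (pi : List Nat) (i : Nat) (hi : i < t.length)
    (hInv : ∀ m, m < i → pi.getD m 0 = mxb (t.take (m + 1))) (c : Char) :
    ∀ fuel k, k ≤ fuel → brd (t.take i) k →
      (∀ j, brd (t.take i) j → t.getD j ' ' = c → j ≤ k) →
      brd (t.take i) (kmpFall t pi c fuel k) ∧
        (0 < kmpFall t pi c fuel k → t.getD (kmpFall t pi c fuel k) ' ' = c) ∧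
        (∀ j, brd (t.take i) j → t.getD j ' ' = c → j ≤ kmpFall t pi c fuel k) := by
  intro fuel
  induction fuel with
  | zero =>
      intro k hfuel hbrd hmax
      have hk0 : k = 0 := by omega
      subst hk0
      exact ⟨hbrd, by intro h; simp [kmpFall] at h, hmax⟩
  | succ fuel ih =>
      intro k hfuel hbrd hmax
      have hul : (t.take i).length = i := by rw [List.length_take]; omega
      simp only [kmpFall]
      by_cases hcond : 0 < k ∧ ¬ (t.getD k ' ' = c)
      · rw [if_pos hcond]
        have hki : k < i := by have := hbrd.1; omega
        have hk1 : pi.getD (k - 1) 0 = mxb (t.take k) := by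
          have := hInv (k - 1) (by omega)
          rwa [show k - 1 + 1 = k by omega] at this
        have htk : (t.take i).take k = t.take k := by
          rw [List.take_take]; congr 1; omega
        have hne : t.take k ≠ [] := by
          have hl : 0 < (t.take k).length := by rw [List.length_take]; omega
          exact List.length_pos_iff.mp hl
        have hb' : brd (t.take i) (pi.getD (k - 1) 0) := by
          rw [hk1]
          refine brd_trans (t.take i) _ k hbrd ?_
          rw [htk]; exact mxb_brd _ hne
        have hm' : ∀ j, brd (t.take i) j → t.getD j ' ' = c → j ≤ pi.getD (k - 1) 0 := by
          intro j hj hjc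
          have hjk := hmax j hj hjc
          have hjne : j ≠ k := fun he => hcond.2 (he ▸ hjc)
          have hnest := brd_nested (t.take i) j k hbrd hj (by omega)
          rw [htk] at hnest
          rw [hk1]
          exact brd_le_mxb _ _ hnest
        have hfe : pi.getD (k - 1) 0 ≤ fuel := by
          rw [hk1]
          have h2 := mxb_lt_length (t.take k) hne
          rw [List.length_take] at h2
          omega
        exact ih _ hfe hb' hm'
      · rw [if_neg hcond]
        refine ⟨hbrd, ?_, hmax⟩
        intro hr
        by_contra hne
        exact hcond ⟨hr, hne⟩

-- partial builds of the prefix-function table (proof device for the foldl)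
def kmpBuildN (t : List Char) (n : Nat) : List Nat :=
  (List.range' 1 n).foldl (kmpStep t) [0]

theorem getD_take_eq (t : List Char) (i r : Nat) (hr : r < i) :
    (t.take i).getD r ' ' = t.getD r ' ' := by
  simp [List.getD, hr]

theorem mxb_eq_of (s : List Char) (hs : s ≠ []) (v : Nat) (hb : brd s v)
    (hmax : ∀ m, brd s m → m ≤ v) : mxb s = v :=
  Nat.le_antisymm (hmax _ (mxb_brd s hs)) (brd_le_mxb s v hb)

theorem take_succ_eq (t : List Char) (i : Nat) (hi : i < t.length) :
    t.take (i + 1) = t.take i ++ [t.getD i ' '] := by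
  rw [List.take_succ, List.getElem?_eq_getElem hi, List.getD_eq_getElem t ' ' hi]
  rfl

theorem kmpBuildN_spec (t : List Char) (h : t ≠ []) :
    ∀ n, n ≤ t.length - 1 →
      (kmpBuildN t n).length = n + 1 ∧
      ∀ m, m ≤ n → (kmpBuildN t n).getD m 0 = mxb (t.take (m + 1)) := by
  have hpos : 0 < t.length := List.length_pos_iff.mpr h
  intro n
  induction n with
  | zero =>
      intro _
      refine ⟨rfl, ?_⟩
      intro m hm
      have hm0 : m = 0 := by omega
      subst hm0
      have h1 : (t.take 1).length = 1 := by rw [List.length_take]; omega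
      show (0 : Nat) = mxb (t.take 1)
      unfold mxb
      rw [h1]
      rfl
  | succ n ih =>
      intro hn
      have hprev := ih (by omega)
      have hi : n + 1 < t.length := by omega
      have hrange : List.range' 1 (n + 1) = List.range' 1 n ++ [1 + n] := by
        simpa using List.range'_concat (s := 1) (n := n) (step := 1)
      have hstep : kmpBuildN t (n + 1) = kmpStep t (kmpBuildN t n) (1 + n) := by
        unfold kmpBuildN
        rw [hrange, List.foldl_append]
        rfl
      rw [show 1 + n = n + 1 by omega] at hstep
      have hInv : ∀ m, m < n + 1 → (kmpBuildN t n).getD m 0 = mxb (t.take (m + 1)) :=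
        fun m hm => hprev.2 m (by omega)
      have hune : t.take (n + 1) ≠ [] := by
        have : 0 < (t.take (n + 1)).length := by rw [List.length_take]; omega
        exact List.length_pos_iff.mp this
      have hulen : (t.take (n + 1)).length = n + 1 := by rw [List.length_take]; omega
      have hbrd0 : brd (t.take (n + 1)) (mxb (t.take (n + 1))) := mxb_brd _ hune
      have hmax0 : ∀ j, brd (t.take (n + 1)) j → t.getD j ' ' = t.getD (n + 1) ' ' →
          j ≤ mxb (t.take (n + 1)) := fun j hj _ => brd_le_mxb _ _ hj
      have HF := kmpFall_spec t (kmpBuildN t n) (n + 1) hi hInv (t.getD (n + 1) ' ')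
        (mxb (t.take (n + 1))) (mxb (t.take (n + 1))) (le_refl _) hbrd0 hmax0
      have hk0 : (kmpBuildN t n).getD (n + 1 - 1) 0 = mxb (t.take (n + 1)) := by
        simpa using hprev.2 n (le_refl n)
      have hstep2 : kmpBuildN t (n + 1) = kmpBuildN t n ++
          [if t.getD (n + 1) ' ' = t.getD (kmpFall t (kmpBuildN t n) (t.getD (n + 1) ' ')
              (mxb (t.take (n + 1))) (mxb (t.take (n + 1)))) ' '
            then kmpFall t (kmpBuildN t n) (t.getD (n + 1) ' ')
              (mxb (t.take (n + 1))) (mxb (t.take (n + 1))) + 1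
            else kmpFall t (kmpBuildN t n) (t.getD (n + 1) ' ')
              (mxb (t.take (n + 1))) (mxb (t.take (n + 1)))] := by
        rw [hstep]
        simp only [kmpStep]
        rw [hk0]
      -- name the result of the falling loop
      set r := kmpFall t (kmpBuildN t n) (t.getD (n + 1) ' ') (mxb (t.take (n + 1)))
        (mxb (t.take (n + 1))) with hr
      have hrlt : r < n + 1 := by have := HF.1.1; rwa [hulen] at this
      -- the appended value is the longest border of t.take (n+2)
      have hval : (if t.getD (n + 1) ' ' = t.getD r ' ' then r + 1 else r) =
          mxb (t.take (n + 1 + 1)) := by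
        rw [take_succ_eq t (n + 1) hi]
        by_cases hm : t.getD (n + 1) ' ' = t.getD r ' '
        · rw [if_pos hm]
          refine (mxb_eq_of _ (by simp) (r + 1) ?_ ?_).symm
          · refine (brd_snoc _ _ _).mpr ⟨HF.1, ?_⟩
            rw [getD_take_eq t (n + 1) r hrlt]
            exact hm.symm
          · intro m hm2
            match m with
            | 0 => omega
            | j + 1 =>
                have hj := (brd_snoc _ _ _).mp hm2
                have hjl : j < n + 1 := by have := hj.1.1; rwa [hulen] at this
                have hjc : t.getD j ' ' = t.getD (n + 1) ' ' := by
                  rw [← getD_take_eq t (n + 1) j hjl]; exact hj.2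
                have := HF.2.2 j hj.1 hjc
                omega
        · rw [if_neg hm]
          have hr0 : r = 0 := by
            by_contra hne
            exact hm (HF.2.1 (by omega)).symm
          rw [hr0] at hm ⊢
          refine (mxb_eq_of _ (by simp) 0 (brd_zero _ (by simp)) ?_).symm
          intro m hm2
          match m with
          | 0 => omega
          | j + 1 =>
              have hj := (brd_snoc _ _ _).mp hm2
              have hjl : j < n + 1 := by have := hj.1.1; rwa [hulen] at this
              have hjc : t.getD j ' ' = t.getD (n + 1) ' ' := by
                rw [← getD_take_eq t (n + 1) j hjl]; exact hj.2
              have hj0 := HF.2.2 j hj.1 hjc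
              rw [hr0] at hj0
              have hj0' : j = 0 := by omega
              subst hj0'
              exact absurd hjc.symm hm
      refine ⟨?_, ?_⟩
      · rw [hstep2]; simp [hprev.1]
      · intro m hm
        rcases Nat.lt_or_ge m (n + 1) with hlt | hge
        · rw [hstep2, List.getD_append _ _ _ _ (by omega)]
          exact hprev.2 m (by omega)
        · have hme : m = n + 1 := by omega
          subst hme
          rw [hstep2]
          have hidx : (kmpBuildN t n ++
              [if t.getD (n + 1) ' ' = t.getD r ' ' then r + 1 else r]).getD (n + 1) 0 =
              (if t.getD (n + 1) ' ' = t.getD r ' ' then r + 1 else r) := by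
            unfold List.getD
            rw [List.getElem?_append_right (by omega), hprev.1]
            simp
          rw [hidx, hval]

-- the build loop computes the prefix function
theorem kmpBuild_spec (t : List Char) (h : t ≠ []) :
    (kmpBuild t).length = t.length ∧
      ∀ m, m < t.length → (kmpBuild t).getD m 0 = mxb (t.take (m + 1)) := by
  have hpos : 0 < t.length := List.length_pos_iff.mpr h
  have hb : kmpBuild t = kmpBuildN t (t.length - 1) := rfl
  have hs := kmpBuildN_spec t h (t.length - 1) (le_refl _)
  rw [hb]
  exact ⟨by rw [hs.1]; omega, fun m hm => hs.2 m (by omega)⟩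

-- the final chain loop returns the smallest positive border (or 0 if none)
theorem chainMin_spec (t : List Char) (pi : List Nat)
    (hInv : ∀ m, m < t.length → pi.getD m 0 = mxb (t.take (m + 1))) :
    ∀ fuel k, k ≤ fuel → brd t k → (k = 0 → ∀ j, brd t j → j = 0) →
      (chainMin pi fuel k = 0 → ∀ j, brd t j → j = 0) ∧
        (0 < chainMin pi fuel k → brd t (chainMin pi fuel k) ∧
          ∀ j, brd t j → 0 < j → chainMin pi fuel k ≤ j) := by
  intro fuel
  induction fuel with
  | zero =>
      intro k hfuel hbrd hzero
      have hk0 : k = 0 := by omega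
      subst hk0
      simp only [chainMin]
      exact ⟨fun _ => hzero rfl, fun hr => absurd hr (by omega)⟩
  | succ fuel ih =>
      intro k hfuel hbrd hzero
      simp only [chainMin]
      by_cases hcond : 0 < k ∧ 0 < pi.getD (k - 1) 0
      · rw [if_pos hcond]
        have hkl : k < t.length := hbrd.1
        have hk1 : pi.getD (k - 1) 0 = mxb (t.take k) := by
          have := hInv (k - 1) (by omega)
          rwa [show k - 1 + 1 = k by omega] at this
        have hne : t.take k ≠ [] := by
          have : 0 < (t.take k).length := by rw [List.length_take]; omega
          exact List.length_pos_iff.mp this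
        have hb' : brd t (pi.getD (k - 1) 0) := by
          rw [hk1]; exact brd_trans t _ k hbrd (mxb_brd _ hne)
        have hfe : pi.getD (k - 1) 0 ≤ fuel := by
          have h2 := mxb_lt_length (t.take k) hne
          rw [List.length_take] at h2
          rw [hk1]; omega
        exact ih _ hfe hb' (fun he => absurd he (by omega))
      · rw [if_neg hcond]
        rcases Nat.eq_zero_or_pos k with hk | hk
        · subst hk
          exact ⟨fun _ => hzero rfl, fun hr => absurd hr (by omega)⟩
        · have hp0 : pi.getD (k - 1) 0 = 0 := by
            have := not_and.mp hcond hk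
            omega
          have hkl : k < t.length := hbrd.1
          have hk1 : pi.getD (k - 1) 0 = mxb (t.take k) := by
            have := hInv (k - 1) (by omega)
            rwa [show k - 1 + 1 = k by omega] at this
          refine ⟨fun h0 => absurd h0 (by omega), fun _ => ⟨hbrd, ?_⟩⟩
          intro j hj hjpos
          by_contra hlt
          push_neg at hlt
          have hnest := brd_nested t j k hbrd hj hlt
          have hle := brd_le_mxb _ _ hnest
          rw [← hk1, hp0] at hle
          omega

theorem getD_drop_eq (t : List Char) (m i : Nat) :
    (t.drop m).getD i ' ' = t.getD (m + i) ' ' := by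
  simp [List.getD, List.getElem?_drop]

theorem mem_of_getD (l : List Char) (i : Nat) (hi : i < l.length) (c : Char)
    (h : l.getD i ' ' = c) : c ∈ l := by
  rw [List.getD_eq_getElem l ' ' hi] at h
  exact h ▸ List.getElem_mem hi

-- borders of l2 ++ sep :: l1 are exactly the overlaps
theorem brd_overlap (l1 l2 : List Char) (h1 : l1 ≠ []) (h2 : l2 ≠ [])
    (hs1 : '\x00' ∉ l1) (hs2 : '\x00' ∉ l2) (k : Nat) (hk : 0 < k) :
    brd (l2 ++ '\x00' :: l1) k ↔ (k ≤ min l1.length l2.length ∧ ovMatch l1 l2 k = true) := by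
  have hL : (l2 ++ '\x00' :: l1).length = l2.length + 1 + l1.length := by
    rw [List.length_append, List.length_cons]; omega
  have hsepD : (l2 ++ '\x00' :: l1).getD l2.length ' ' = '\x00' := by
    unfold List.getD
    rw [List.getElem?_append_right (le_refl _)]
    simp
  by_cases hmin : k ≤ min l1.length l2.length
  · have ht : (l2 ++ '\x00' :: l1).take k = l2.take k :=
      List.take_append_of_le_length (by omega)
    have hd : (l2 ++ '\x00' :: l1).drop ((l2 ++ '\x00' :: l1).length - k) =
        l1.drop (l1.length - k) := by
      have hidx : (l2 ++ '\x00' :: l1).length - k = (l2 ++ ['\x00']).length + (l1.length - k) := by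
        rw [hL, List.length_append]
        simp
        omega
      rw [hidx, List.append_cons, List.drop_append]
      have hX : ((l2 ++ ['\x00'] ++ []).length) = l2.length + 1 := by simp
      rw [hX, List.drop_eq_nil_of_le (by omega), List.nil_append,
        show l2.length + 1 + (l1.length - k) - l2.length = (l1.length - k) + 1 by omega,
        List.drop_succ_cons]
    constructor
    · rintro ⟨_, hk2⟩
      rw [ht, hd] at hk2
      exact ⟨hmin, by rw [ovMatch, decide_eq_true_iff]; exact hk2.symm⟩
    · rintro ⟨_, hov⟩
      rw [ovMatch, decide_eq_true_iff] at hov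
      exact ⟨by omega, by rw [ht, hd]; exact hov.symm⟩
  · constructor
    · rintro ⟨hk1, hk2⟩
      exfalso
      rw [hL] at hk1
      by_cases hk2n : k ≤ l2.length
      · -- then l1.length < k: the suffix's char aligned with the separator lies in l2
        have hi : k - 1 - l1.length < k := by omega
        have e1 : ((l2 ++ '\x00' :: l1).take k).getD (k - 1 - l1.length) ' ' =
            (l2 ++ '\x00' :: l1).getD (k - 1 - l1.length) ' ' := getD_take_eq _ k _ hi
        have e2 : (l2 ++ '\x00' :: l1).getD (k - 1 - l1.length) ' ' =
            l2.getD (k - 1 - l1.length) ' ' := by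
          unfold List.getD
          rw [List.getElem?_append_left (by omega)]
        have e3 := getD_drop_eq (l2 ++ '\x00' :: l1)
          ((l2 ++ '\x00' :: l1).length - k) (k - 1 - l1.length)
        have e4 : (l2 ++ '\x00' :: l1).length - k + (k - 1 - l1.length) = l2.length := by
          rw [hL]; omega
        have hfin : l2.getD (k - 1 - l1.length) ' ' = '\x00' := by
          rw [← e2, ← e1, hk2, e3, e4, hsepD]
        exact hs2 (mem_of_getD l2 _ (by omega) _ hfin)
      · -- l2.length < k: the prefix contains the separator, aligned with a char of l1
        have e1 : ((l2 ++ '\x00' :: l1).take k).getD l2.length ' ' =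
            (l2 ++ '\x00' :: l1).getD l2.length ' ' := getD_take_eq _ k _ (by omega)
        have e3 := getD_drop_eq (l2 ++ '\x00' :: l1)
          ((l2 ++ '\x00' :: l1).length - k) l2.length
        have e6 : (l2 ++ '\x00' :: l1).getD
            ((l2 ++ '\x00' :: l1).length - k + l2.length) ' ' =
            l1.getD ((l2 ++ '\x00' :: l1).length - k - 1) ' ' := by
          unfold List.getD
          rw [List.getElem?_append_right (by omega)]
          rw [show (l2 ++ '\x00' :: l1).length - k + l2.length - l2.length =
              (l2 ++ '\x00' :: l1).length - k by omega]
          rw [show (l2 ++ '\x00' :: l1).length - k =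
              ((l2 ++ '\x00' :: l1).length - k - 1) + 1 by rw [hL]; omega]
          rw [List.getElem?_cons_succ]
          simp
        have hfin : l1.getD ((l2 ++ '\x00' :: l1).length - k - 1) ' ' = '\x00' := by
          rw [← e6, ← e3, ← hk2, e1, hsepD]
        have hb : (l2 ++ '\x00' :: l1).length - k - 1 < l1.length := by rw [hL]; omega
        exact hs1 (mem_of_getD l1 _ hb _ hfin)
    · rintro ⟨hc, _⟩
      exact absurd hc hmin

-- === A-side reduction (find?-style reference) ===
theorem mashA_loop_eq_find (l1 l2 : List Char) (is : List Int) :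
    mashA_loop l1 l2 is =
      match is.find? (fun i =>
          decide (i < (l2.length : Int)) &&
          (PySem.List.slice l1 (some ((l1.length : Int) - (i + 1))) none ==
           PySem.List.slice l2 none (some (i + 1)))) with
      | some i => String.ofList (l1 ++ PySem.List.slice l2
          (some (((PySem.List.slice l1 (some ((l1.length : Int) - (i + 1))) none).length : Int))) none)
      | none => String.ofList (l1 ++ l2) := by
  induction is with
  | nil => rfl
  | cons i rest ih =>
      simp only [mashA_loop, List.find?_cons]
      by_cases hg : i < (l2.length : Int)
      · by_cases he : PySem.List.slice l1 (some ((l1.length : Int) - (i + 1))) none =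
            PySem.List.slice l2 none (some (i + 1))
        · simp [hg, he]
        · rw [show (PySem.List.slice l1 (some ((l1.length : Int) - (i + 1))) none ==
                PySem.List.slice l2 none (some (i + 1))) = false from beq_eq_false_iff_ne.mpr he]
          simp [hg, ih]
          exact fun h => absurd h he
      · simp [hg, ih]

theorem find?_map_gen {A B : Type} (f : A → B) (l : List A) (p : B → Bool) :
    List.find? p (l.map f) = (List.find? (fun k => p (f k)) l).map f := by
  induction l with
  | nil => rfl
  | cons a t ih =>
      simp only [List.map_cons, List.find?_cons]
      cases p (f a) <;> simp [ih]

theorem find?_congr_mem {A : Type} (l : List A) (p q : A → Bool) (h : ∀ x ∈ l, p x = q x) :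
    List.find? p l = List.find? q l := by
  induction l with
  | nil => rfl
  | cons a t ih =>
      simp only [List.find?_cons, h a (List.mem_cons_self)]
      cases q a
      · exact ih (fun x hx => h x (List.mem_cons_of_mem _ hx))
      · rfl

theorem pyRange_zero_eq_map_range (n : Nat) :
    PySem.List.pyRange 0 (n : Int) 1 = (List.range n).map (fun k : Nat => (k : Int)) := by
  induction n with
  | zero => rfl
  | succ n ih =>
      rw [show ((n+1 : Nat) : Int) = (n : Int) + 1 by push_cast; ring,
        PySem.List.pyRange_one_succ_right (by positivity), ih, List.range_succ]
      simp

-- A's side reduced to the first matching overlap length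
theorem mashA_eq_ref (l1 l2 : List Char) :
    mashA_loop l1 l2 (PySem.List.pyRange 0 (l1.length : Int) 1) =
      match (List.range (min l1.length l2.length)).find? (fun j => ovMatch l1 l2 (j+1)) with
      | some j => String.ofList (l1 ++ l2.drop (j+1))
      | none => String.ofList (l1 ++ l2) := by
  rw [mashA_loop_eq_find, pyRange_zero_eq_map_range,
    find?_map_gen (fun k : Nat => (k : Int)) (List.range l1.length)]
  have hA : List.find?
      (fun k : Nat => decide ((k : Int) < (l2.length : Int)) &&
        (PySem.List.slice l1 (some ((l1.length : Int) - ((k : Int) + 1))) none ==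
         PySem.List.slice l2 none (some ((k : Int) + 1))))
      (List.range l1.length) =
      List.find? (fun j => decide (j < l2.length) && ovMatch l1 l2 (j+1)) (List.range l1.length) := by
    apply find?_congr_mem
    intro j hj
    have hj1 : j < l1.length := List.mem_range.mp hj
    have hc2 : ((j : Int) + 1) = (((j+1 : Nat)) : Int) := by omega
    rw [hc2]
    have hc1 : ((l1.length : Int) - (((j+1 : Nat)) : Int)) = ((l1.length - (j+1) : Nat) : Int) := by omega
    rw [hc1, PySem.List.slice_from_natCast, PySem.List.slice_to_natCast]
    by_cases he : List.drop (l1.length - (j+1)) l1 = List.take (j+1) l2 <;>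
      simp [ovMatch, he, beq_eq_false_iff_ne]
  rw [hA]
  have hm : min l1.length l2.length ≤ l1.length := Nat.min_le_left _ _
  have hsplit : List.range l1.length =
      List.range (min l1.length l2.length) ++
        List.range' (min l1.length l2.length) (l1.length - min l1.length l2.length) := by
    rw [List.range_eq_range', List.range_eq_range']
    rw [show l1.length = min l1.length l2.length + (l1.length - min l1.length l2.length) by omega,
      ← List.range'_append_1]
    simp
  rw [hsplit, List.find?_append]
  have hnone : List.find? (fun j => decide (j < l2.length) && ovMatch l1 l2 (j+1))
      (List.range' (min l1.length l2.length) (l1.length - min l1.length l2.length)) = none := by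
    apply List.find?_eq_none.mpr
    intro x hx
    have hx' := List.mem_range'_1.mp hx
    have hxn : ¬ x < l2.length := by omega
    simp [hxn]
  rw [hnone]
  have hpre : List.find? (fun j => decide (j < l2.length) && ovMatch l1 l2 (j+1))
      (List.range (min l1.length l2.length)) =
      List.find? (fun j => ovMatch l1 l2 (j+1)) (List.range (min l1.length l2.length)) := by
    apply find?_congr_mem
    intro j hj
    have hjm : j < min l1.length l2.length := List.mem_range.mp hj
    have hjn : j < l2.length := by omega
    simp [hjn]
  rw [hpre]
  cases hF : List.find? (fun j => ovMatch l1 l2 (j+1)) (List.range (min l1.length l2.length)) with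
  | none => simp
  | some j =>
      have hjm : j < min l1.length l2.length := List.mem_range.mp (List.mem_of_find?_eq_some hF)
      have hc : ((l1.length : Int) - ((j : Int) + 1)) = ((l1.length - (j+1) : Nat) : Int) := by omega
      simp only [Option.or_none, Option.map_some, hc, PySem.List.slice_from_natCast,
        List.length_drop]
      rw [show l1.length - (l1.length - (j+1)) = j + 1 by omega]

-- find? over an initial range returns the first index satisfying the predicate
theorem find?_range_eq_some (p : Nat → Bool) (m j : Nat) (hj : j < m) (hpj : p j = true)
    (hmin : ∀ i, i < j → p i = false) : (List.range m).find? p = some j := by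
  have hsplit : List.range m = List.range (j + 1) ++ List.range' (j + 1) (m - (j + 1)) := by
    rw [List.range_eq_range', List.range_eq_range']
    rw [show m = (j + 1) + (m - (j + 1)) by omega, ← List.range'_append_1]
    simp
  rw [hsplit, List.find?_append, List.range_succ, List.find?_append]
  have h1 : (List.range j).find? p = none :=
    List.find?_eq_none.mpr (fun x hx => by rw [hmin x (List.mem_range.mp hx)]; simp)
  rw [h1]
  simp [hpj]

-- B's side reduced to the same reference
theorem mashB_eq_ref (l1 l2 : List Char) (h1 : l1 ≠ []) (h2 : l2 ≠ [])
    (hs1 : '\x00' ∉ l1) (hs2 : '\x00' ∉ l2) :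
    (let t := l2 ++ '\x00' :: l1
     let pis := kmpBuild t
     let kl := pis.getD (t.length - 1) 0
     let k := chainMin pis kl kl
     if 0 < k then String.ofList (l1 ++ PySem.List.slice l2 (some (k : Int)) none)
     else String.ofList (l1 ++ l2)) =
      match (List.range (min l1.length l2.length)).find? (fun j => ovMatch l1 l2 (j+1)) with
      | some j => String.ofList (l1 ++ l2.drop (j+1))
      | none => String.ofList (l1 ++ l2) := by
  have htne : (l2 ++ '\x00' :: l1) ≠ [] := by simp
  have hpos : 0 < (l2 ++ '\x00' :: l1).length := List.length_pos_iff.mpr htne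
  have HB := kmpBuild_spec (l2 ++ '\x00' :: l1) htne
  have hkl : (kmpBuild (l2 ++ '\x00' :: l1)).getD ((l2 ++ '\x00' :: l1).length - 1) 0 =
      mxb (l2 ++ '\x00' :: l1) := by
    have := HB.2 ((l2 ++ '\x00' :: l1).length - 1) (by omega)
    rwa [show (l2 ++ '\x00' :: l1).length - 1 + 1 = (l2 ++ '\x00' :: l1).length by omega,
      List.take_length] at this
  have hzero : mxb (l2 ++ '\x00' :: l1) = 0 → ∀ j, brd (l2 ++ '\x00' :: l1) j → j = 0 := by
    intro h0 j hj
    have := brd_le_mxb _ _ hj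
    omega
  have HC := chainMin_spec (l2 ++ '\x00' :: l1) (kmpBuild (l2 ++ '\x00' :: l1)) HB.2
    (mxb (l2 ++ '\x00' :: l1)) (mxb (l2 ++ '\x00' :: l1)) (le_refl _)
    (mxb_brd _ htne) hzero
  show (if 0 < chainMin (kmpBuild (l2 ++ '\x00' :: l1))
          ((kmpBuild (l2 ++ '\x00' :: l1)).getD ((l2 ++ '\x00' :: l1).length - 1) 0)
          ((kmpBuild (l2 ++ '\x00' :: l1)).getD ((l2 ++ '\x00' :: l1).length - 1) 0)
      then String.ofList (l1 ++ PySem.List.slice l2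
          ((some ((chainMin (kmpBuild (l2 ++ '\x00' :: l1))
            ((kmpBuild (l2 ++ '\x00' :: l1)).getD ((l2 ++ '\x00' :: l1).length - 1) 0)
            ((kmpBuild (l2 ++ '\x00' :: l1)).getD ((l2 ++ '\x00' :: l1).length - 1) 0) : Nat) : Int))) none)
      else String.ofList (l1 ++ l2)) = _
  rw [hkl]
  set r := chainMin (kmpBuild (l2 ++ '\x00' :: l1)) (mxb (l2 ++ '\x00' :: l1))
    (mxb (l2 ++ '\x00' :: l1)) with hrdef
  rcases Nat.eq_zero_or_pos r with hr | hr
  · rw [hr]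
    have hnone : (List.range (min l1.length l2.length)).find?
        (fun j => ovMatch l1 l2 (j+1)) = none := by
      apply List.find?_eq_none.mpr
      intro j hjm
      have hjm' : j < min l1.length l2.length := List.mem_range.mp hjm
      intro hov
      have hb : brd (l2 ++ '\x00' :: l1) (j + 1) :=
        (brd_overlap l1 l2 h1 h2 hs1 hs2 (j + 1) (by omega)).mpr ⟨by omega, hov⟩
      have := HC.1 hr (j + 1) hb
      omega
    rw [hnone]
    simp
  · have HM := HC.2 hr
    have hro := (brd_overlap l1 l2 h1 h2 hs1 hs2 r hr).mp HM.1
    have hsome : (List.range (min l1.length l2.length)).find?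
        (fun j => ovMatch l1 l2 (j+1)) = some (r - 1) := by
      apply find?_range_eq_some
      · omega
      · rw [show r - 1 + 1 = r by omega]; exact hro.2
      · intro i hi
        by_contra hpi
        have hpi' : ovMatch l1 l2 (i + 1) = true := by
          revert hpi; cases hb : ovMatch l1 l2 (i + 1) <;> simp
        have hb : brd (l2 ++ '\x00' :: l1) (i + 1) :=
          (brd_overlap l1 l2 h1 h2 hs1 hs2 (i + 1) (by omega)).mpr ⟨by omega, hpi'⟩
        have := HM.2 (i + 1) hb (by omega)
        omega
    rw [hsome, if_pos hr, PySem.List.slice_from_natCast]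
    show String.ofList (l1 ++ List.drop r l2) = String.ofList (l1 ++ List.drop (r - 1 + 1) l2)
    rw [show r - 1 + 1 = r by omega]

-- ===== VERDICT (by name: the statement is the Claim_ definition above) =====
theorem mash_left_spec : Claim_equal_mash_left := by
  intro word1 word2 hDom
  unfold Spec_mash_left mash_left mash_left_alt
  by_cases hw1 : word1.toList = []
  · simp [hw1]
  · by_cases hw2 : word2.toList = []
    · simp [hw1, hw2]
    · simp only [hw1, hw2, if_false]
      have hD : (pvDomStr word1 && pvDomStr word2) = true := hDom
      have hD1 : ∀ c ∈ word1.toList, pvDomChar c = true := by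
        have := (Bool.and_eq_true _ _).mp hD |>.1
        exact fun c hc => List.all_eq_true.mp this c hc
      have hD2 : ∀ c ∈ word2.toList, pvDomChar c = true := by
        have := (Bool.and_eq_true _ _).mp hD |>.2
        exact fun c hc => List.all_eq_true.mp this c hc
      have hs1 : '\x00' ∉ word1.toList := fun h => by simpa [pvDomChar] using hD1 _ h
      have hs2 : '\x00' ∉ word2.toList := fun h => by simpa [pvDomChar] using hD2 _ h
      rw [mashA_eq_ref]
      exact (mashB_eq_ref word1.toList word2.toList hw1 hw2 hs1 hs2).symm
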